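-- pv_equiv track=rewrite | github.com/todayis-sunny/Algorithm | 프로그래머스/2/172927. 광물 캐기/광물 캐기.py | solution
-- ===== SOURCE A (Python) =====
-- def solution(picks, minerals):
--     values = []
--     tmp = [0, 0, 0]
--     for i in range(len(minerals)):
--         if i % 5 == 0 and i != 0:
--             values.append(tmp)
--             tmp = [0, 0, 0]
--         if minerals[i] == 'diamond':
--             tmp[0] += 1
--         elif minerals[i] == 'iron':
--             tmp[1] += 1
--         else:
--             tmp[2] += 1
--     if tmp != [0, 0, 0]:
--         values.append(tmp)
--     values = values[:sum(picks)]
--     values = sorted(values, reverse = True)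
--     limit = len(values)
--
--     result = 0
--     idx = 0
--
--     for i in range(3):
--         pick = picks[i]
--         while pick:
--             if idx == limit:
--                 break
--             if i == 0:
--                 result += values[idx][0] * 1 + values[idx][1] * 1 + values[idx][2] * 1
--             elif i == 1:
--                 result += values[idx][0] * 5 + values[idx][1] * 1 + values[idx][2] * 1
--             else:
--                 result += values[idx][0] * 25 + values[idx][1] * 5 + values[idx][2] * 1
--             pick -= 1
--             idx += 1
--     return result
-- ===== SOURCE B (Python) =====
-- def solution(picks, minerals):
--     # Chunk the minerals into groups of 5 by index slicing and count each chunk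
--     # into a (diamond, iron, stone) tuple; truncate to sum(picks) groups and
--     # sort descending.  Then one pass over the groups spends the picks: a tier
--     # pointer advances whenever the current pick count is spent (falsy),
--     # replacing the original three while-loops with idx/limit bookkeeping.
--     groups = []
--     for i in range(0, len(minerals), 5):
--         chunk = minerals[i:i + 5]
--         d = chunk.count('diamond')
--         it = chunk.count('iron')
--         groups.append((d, it, len(chunk) - d - it))
--     groups = sorted(groups[:sum(picks)], reverse=True)
--     weights = [(1, 1, 1), (5, 1, 1), (25, 5, 1)]
--     score = 0
--     tier, remaining = 0, picks[0]
--     for d, i, s in groups: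
--         while not remaining and tier < 2:
--             tier += 1
--             remaining = picks[tier]
--         if not remaining:
--             break
--         wd, wi, ws = weights[tier]
--         score += wd * d + wi * i + ws * s
--         remaining -= 1
--     return score
-- ===== Notes on version B (the rewrite author's own statement) =====
-- stated objective: simpler
-- what changed: B replaces the index/mod-5 grouping loop by slicing 5-element chunks and counting each with list.count, and replaces the three per-tier while-loops with idx/limit bookkeeping by a single pass over the sorted groups that advances a tier pointer whenever the current pick count is spent.
import Mathlib
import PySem

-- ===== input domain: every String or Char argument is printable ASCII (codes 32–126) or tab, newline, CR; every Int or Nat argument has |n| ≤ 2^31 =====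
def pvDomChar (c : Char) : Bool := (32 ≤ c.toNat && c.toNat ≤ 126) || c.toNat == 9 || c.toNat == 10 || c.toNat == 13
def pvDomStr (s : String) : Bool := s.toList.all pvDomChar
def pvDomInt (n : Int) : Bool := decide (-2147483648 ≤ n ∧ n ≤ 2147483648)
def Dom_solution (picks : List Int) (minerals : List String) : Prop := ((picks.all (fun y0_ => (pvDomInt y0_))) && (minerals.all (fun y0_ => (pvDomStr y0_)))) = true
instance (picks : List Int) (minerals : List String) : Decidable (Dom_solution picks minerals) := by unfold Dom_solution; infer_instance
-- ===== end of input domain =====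

-- B chunks the minerals by index slicing and replaces the three idx/limit while-loops by a
-- single pass over the sorted groups with a tier pointer; equal return value on Pre_.

-- ===== PORT A =====

-- one group [d, i, s] (a Python list of 3 ints) is represented as a triple Int × Int × Int
def bumpA (tmp : Int × Int × Int) (m : String) : Int × Int × Int :=
  if m = "diamond" then (tmp.1 + 1, tmp.2.1, tmp.2.2)
  else if m = "iron" then (tmp.1, tmp.2.1 + 1, tmp.2.2)
  else (tmp.1, tmp.2.1, tmp.2.2 + 1)

-- the 'for i in range(len(minerals))' loop: structural recursion over minerals with the index i
def buildA : List String → Nat → (Int × Int × Int) → List (Int × Int × Int) → List (Int × Int × Int)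
  | [], _, tmp, values => if tmp ≠ (0, 0, 0) then values ++ [tmp] else values
  | m :: rest, i, tmp, values =>
      if i % 5 = 0 ∧ i ≠ 0 then buildA rest (i + 1) (bumpA (0, 0, 0) m) (values ++ [tmp])
      else buildA rest (i + 1) (bumpA tmp m) values

-- sorted(values, reverse=True) compares the 3-int groups lexicographically; each component
-- is a count in 0..5, so the Int key d*36 + i*6 + s realises exactly that comparison
-- (injective on the groups this program builds, so stability questions do not arise)
def keyA (t : Int × Int × Int) : Int := t.1 * 36 + t.2.1 * 6 + t.2.2

-- the 'while pick' loop for one i: returns (result, idx) after the loop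
def whileA (i : Nat) (pick : Int) (values : List (Int × Int × Int)) (limit idx : Nat)
    (result : Int) : Int × Nat :=
  if pick = 0 then (result, idx)                      -- 'while pick' is false exactly at 0
  else if limit ≤ idx then (result, idx)              -- Python: 'if idx == limit: break'; idx never exceeds limit
  else
    let v := values.getD idx (0, 0, 0)                -- values[idx]; idx < limit = len(values), in range
    let add :=
      if i = 0 then v.1 * 1 + v.2.1 * 1 + v.2.2 * 1
      else if i = 1 then v.1 * 5 + v.2.1 * 1 + v.2.2 * 1
      else v.1 * 25 + v.2.1 * 5 + v.2.2 * 1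
    whileA i (pick - 1) values limit (idx + 1) (result + add)
  termination_by pick.toNat + (limit - idx)
  decreasing_by omega

def solution (picks : List Int) (minerals : List String) : Int :=
  let values0 := buildA minerals 0 (0, 0, 0) []
  let values1 := PySem.List.slice values0 none (some picks.sum)        -- values[:sum(picks)]
  let values := PySem.List.sorted values1 keyA true                    -- sorted(values, reverse=True)
  let limit := values.length
  -- for i in range(3): pick = picks[i] (IndexError for len(picks) < 3 is excluded by Pre_)
  let s0 := whileA 0 ((PySem.List.pyGet? picks 0).getD 0) values limit 0 0
  let s1 := whileA 1 ((PySem.List.pyGet? picks 1).getD 0) values limit s0.2 s0.1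
  let s2 := whileA 2 ((PySem.List.pyGet? picks 2).getD 0) values limit s1.2 s1.1
  s2.1

-- ===== PORT B =====

def countB (chunk : List String) : Int × Int × Int :=
  ((chunk.count "diamond" : Int), (chunk.count "iron" : Int),
   (chunk.length : Int) - (chunk.count "diamond" : Int) - (chunk.count "iron" : Int))

-- same lexicographic comparison as in port A (counts are in 0..5)
def keyB (t : Int × Int × Int) : Int := t.1 * 36 + t.2.1 * 6 + t.2.2

def weightsB : List (Int × Int × Int) := [(1, 1, 1), (5, 1, 1), (25, 5, 1)]

-- the inner 'while not remaining and tier < 2' advance of the tier pointer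
def advanceB (picks : List Int) (tier remaining : Int) : Int × Int :=
  if remaining = 0 ∧ tier < 2 then
    advanceB picks (tier + 1) ((PySem.List.pyGet? picks (tier + 1)).getD 0)
  else (tier, remaining)
  termination_by (2 - tier).toNat
  decreasing_by omega

-- the 'for d, i, s in groups' pass spending the picks; the break returns score
def loopB (picks : List Int) : List (Int × Int × Int) → Int → Int → Int → Int
  | [], score, _, _ => score
  | g :: gs, score, tier, remaining =>
      let tr := advanceB picks tier remaining
      if tr.2 = 0 then score
      else
        let w := (PySem.List.pyGet? weightsB tr.1).getD (0, 0, 0)  -- weights[tier]; 0 ≤ tier ≤ 2, in range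
        loopB picks gs (score + (w.1 * g.1 + w.2.1 * g.2.1 + w.2.2 * g.2.2)) tr.1 (tr.2 - 1)

def solution_alt (picks : List Int) (minerals : List String) : Int :=
  -- for i in range(0, len(minerals), 5): count minerals[i:i+5]
  let groups0 := (PySem.List.pyRange 0 (minerals.length : Int) 5).map
      (fun i => countB (PySem.List.slice minerals (some i) (some (i + 5))))
  let groups := PySem.List.sorted
      (PySem.List.slice groups0 none (some picks.sum)) keyB true
  -- tier, remaining = 0, picks[0] (IndexError for picks = [] is excluded by Pre_)
  loopB picks groups 0 0 ((PySem.List.pyGet? picks 0).getD 0)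

-- ===== PRECONDITION & SPEC =====

-- Pre_ excludes exactly the picks lists with fewer than 3 entries, on which A raises
-- IndexError at 'picks[i]'; A returns normally on every other input.
def Pre_solution (picks : List Int) (minerals : List String) : Prop :=
  3 ≤ picks.length
instance (picks : List Int) (minerals : List String) : Decidable (Pre_solution picks minerals) := by
  unfold Pre_solution; infer_instance

def pvWitness_solution : List Int × List String :=
  ([2, 1, 1], ["diamond", "stone", "iron", "stone", "stone", "iron", "iron"])

def Spec_solution (picks : List Int) (minerals : List String) (out : Int) : Prop :=
  out = solution_alt picks minerals
instance (picks : List Int) (minerals : List String) (out : Int) : Decidable (Spec_solution picks minerals out) := by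
  unfold Spec_solution; infer_instance

-- ===== CLAIM (what is proved, stated in full; the proofs are below) =====
def Claim_equal_solution : Prop := ∀ (picks : List Int) (minerals : List String), Dom_solution picks minerals → Pre_solution picks minerals → Spec_solution picks minerals (solution picks minerals)

-- ===== LEMMAS AND PROOFS =====

-- proof-side recursive view of B's chunking (take 5 / drop 5)
def chunksB (rest : List String) : List (Int × Int × Int) :=
  if _h : rest = [] then []
  else countB (rest.take 5) :: chunksB (rest.drop 5)
  termination_by rest.length
  decreasing_by cases rest with
    | nil => exact absurd rfl _h
    | cons a t => simp

def sum3 (t : Int × Int × Int) : Int := t.1 + t.2.1 + t.2.2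

lemma foldl_bumpA (c : List String) (t : Int × Int × Int) :
    c.foldl bumpA t =
      (t.1 + (c.count "diamond" : Int), t.2.1 + (c.count "iron" : Int),
       t.2.2 + ((c.length : Int) - (c.count "diamond" : Int) - (c.count "iron" : Int))) := by
  induction c generalizing t with
  | nil => simp
  | cons m c ih =>
      simp only [List.foldl_cons, ih, List.count_cons, List.length_cons, bumpA]
      by_cases hd : m = "diamond" <;> by_cases hi : m = "iron" <;>
        simp_all [Prod.ext_iff] <;> omega

lemma foldl_bumpA_zero (c : List String) : c.foldl bumpA (0, 0, 0) = countB c := by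
  simp [foldl_bumpA, countB]

lemma countB_ne_zero (c : List String) (h : c ≠ []) : countB c ≠ (0, 0, 0) := by
  intro he
  apply h
  have h1 := congrArg (fun t => sum3 t) he
  simp [countB, sum3] at h1
  exact h1

-- a run of elements that never hits a chunk boundary
lemma buildA_run (c : List String) :
    ∀ (xs : List String) (i : Nat) tmp values,
      i % 5 + c.length ≤ 5 → (c ≠ [] → i % 5 ≠ 0) →
      buildA (c ++ xs) i tmp values = buildA xs (i + c.length) (c.foldl bumpA tmp) values := by
  induction c with
  | nil => intro xs i tmp values _ _; simp
  | cons m c ih =>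
      intro xs i tmp values hlen hne
      simp only [List.length_cons] at hlen
      have hi : i % 5 ≠ 0 := hne (by simp)
      have hstep : ¬ (i % 5 = 0 ∧ i ≠ 0) := by omega
      simp only [List.cons_append, buildA, if_neg hstep]
      rw [ih xs (i + 1) (bumpA tmp m) values (by omega)
            (fun hc => by have := List.length_pos_of_ne_nil hc; omega)]
      simp only [List.foldl_cons, List.length_cons]
      ring_nf

lemma buildA_eq_chunksB :
    ∀ (xs : List String) (i : Nat) tmp values,
      i % 5 = 0 → (i = 0 → tmp = (0, 0, 0)) → (i ≠ 0 → tmp ≠ (0, 0, 0)) →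
      buildA xs i tmp values =
        values ++ (if i = 0 then [] else [tmp]) ++ chunksB xs := by
  intro xs
  induction xs using chunksB.induct with
  | case1 =>
      intro i tmp values _ h0 hn
      rw [chunksB]
      by_cases hi : i = 0
      · simp [buildA, hi, h0 hi]
      · simp [buildA, hi, hn hi]
  | case2 x hx ih =>
      intro i tmp values h5 h0 hn
      obtain ⟨m, t, rfl⟩ : ∃ m t, x = m :: t := by
        cases x with
        | nil => exact absurd rfl hx
        | cons m t => exact ⟨m, t, rfl⟩
      simp only [List.drop_succ_cons] at ih
      -- first element: boundary append (i ≠ 0) or plain step (i = 0)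
      have hfirst : buildA (m :: t) i tmp values =
          buildA t (i + 1) (bumpA (0, 0, 0) m)
            (values ++ (if i = 0 then [] else [tmp])) := by
        by_cases hi : i = 0
        · simp [buildA, hi, h0 hi]
        · simp [buildA, h5, hi]
      have ht : t = t.take 4 ++ t.drop 4 := (List.take_append_drop 4 t).symm
      have hfold : (t.take 4).foldl bumpA (bumpA (0, 0, 0) m) = countB ((m :: t).take 5) := by
        rw [show (m :: t).take 5 = m :: t.take 4 from rfl, ← foldl_bumpA_zero]
        simp
      have hchunk : chunksB (m :: t) = countB ((m :: t).take 5) :: chunksB (t.drop 4) := by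
        rw [chunksB]
        simp [List.drop_succ_cons]
      have step1 : buildA (m :: t) i tmp values =
          buildA (t.drop 4) (i + 1 + (t.take 4).length) (countB ((m :: t).take 5))
            (values ++ (if i = 0 then [] else [tmp])) := by
        rw [hfirst]
        conv_lhs => rw [ht]
        rw [buildA_run (t.take 4) (t.drop 4) (i + 1) (bumpA (0, 0, 0) m) _
              (by have := List.length_take_le 4 t; omega) (fun _ => by omega)]
        rw [hfold]
      rw [step1, hchunk]
      by_cases hd : t.drop 4 = []
      · -- the list ends inside this chunk
        rw [hd]
        rw [show chunksB ([] : List String) = [] from by rw [chunksB]; rfl]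
        simp [buildA, countB_ne_zero (m :: t.take 4) (by simp)]
      · -- a full chunk of 5, recurse at i + 5
        have hlt : 4 < t.length := by
          by_contra hle
          exact hd (List.drop_eq_nil_of_le (by omega))
        have hlen4 : (t.take 4).length = 4 := by simp [List.length_take]; omega
        rw [hlen4, show i + 1 + 4 = i + 5 from by omega]
        rw [ih (i + 5) _ _ (by omega) (by omega)
              (fun _ => countB_ne_zero _ (show (m :: t).take 5 ≠ [] by simp))]
        simp

lemma slice_chunk (xs : List String) (j : Nat) :
    PySem.List.slice xs (some ((j : Int))) (some ((j : Int) + 5)) = (xs.drop j).take 5 := by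
  rw [show ((j : Int) + 5) = ((j + 5 : Nat) : Int) from by push_cast; ring,
    PySem.List.slice_natCast]
  congr 1
  omega

lemma pyRange5 (n : Nat) :
    PySem.List.pyRange 0 (n : Int) 5
      = (List.range ((n + 4) / 5)).map (fun k : Nat => 5 * (k : Int)) := by
  rw [PySem.List.pyRange_of_pos 0 (n : Int) (show (0 : Int) < 5 by norm_num)]
  by_cases h : 0 < n
  · rw [if_pos (by exact_mod_cast h)]
    rw [show ((n : Int) - 0 + 5 - 1) = ((n + 4 : Nat) : Int) from by push_cast; ring,
      show ((5 : Int)) = ((5 : Nat) : Int) from rfl, ← Int.natCast_ediv]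
    rw [Int.toNat_natCast]
    exact List.map_congr_left (fun k _ => by push_cast; ring)
  · rw [if_neg (by omega), show n = 0 from by omega]
    simp

lemma pyRange_chunks (xs : List String) :
    (PySem.List.pyRange 0 (xs.length : Int) 5).map
      (fun i => countB (PySem.List.slice xs (some i) (some (i + 5)))) = chunksB xs := by
  have hform : ∀ (ys : List String),
      (PySem.List.pyRange 0 (ys.length : Int) 5).map
          (fun i => countB (PySem.List.slice ys (some i) (some (i + 5))))
        = (List.range ((ys.length + 4) / 5)).map
            (fun k => countB ((ys.drop (5 * k)).take 5)) := by
    intro ys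
    rw [pyRange5, List.map_map]
    refine List.map_congr_left (fun k _ => ?_)
    simp only [Function.comp_apply]
    rw [show (5 * (k : Int)) = ((5 * k : Nat) : Int) from by push_cast; ring, slice_chunk]
  rw [hform]
  induction xs using chunksB.induct with
  | case1 => rw [chunksB]; simp
  | case2 x hx ih =>
      rw [chunksB, dif_neg hx]
      have hn : 1 ≤ x.length := List.length_pos_of_ne_nil hx
      have hm : (x.length + 4) / 5 = ((x.drop 5).length + 4) / 5 + 1 := by
        simp only [List.length_drop]
        omega
      rw [hm, List.range_succ_eq_map, List.map_cons, List.map_map]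
      simp only [List.length_drop] at ih ⊢
      rw [← ih]
      congr 1
      refine List.map_congr_left (fun k _ => ?_)
      simp only [Function.comp_apply]
      rw [List.drop_drop, show (5 : Nat) + 5 * k = 5 * Nat.succ k from by omega]

-- the while loop consumes min(pick, remaining) groups
def wI (i : Nat) (v : Int × Int × Int) : Int :=
  if i = 0 then v.1 * 1 + v.2.1 * 1 + v.2.2 * 1
  else if i = 1 then v.1 * 5 + v.2.1 * 1 + v.2.2 * 1
  else v.1 * 25 + v.2.1 * 5 + v.2.2 * 1

def cnt (r : Int) (n : Nat) : Nat :=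
  if r = 0 then 0 else if 0 < r then min r.toNat n else n

lemma cnt_zero (r : Int) : cnt r 0 = 0 := by
  simp only [cnt]; split_ifs <;> omega

lemma cnt_zero_left (n : Nat) : cnt 0 n = 0 := by simp [cnt]

lemma cnt_succ (r : Int) (n : Nat) (h : r ≠ 0) : cnt r (n + 1) = cnt (r - 1) n + 1 := by
  simp only [cnt]; split_ifs <;> omega

lemma cnt_le (r : Int) (n : Nat) : cnt r n ≤ n := by
  simp only [cnt]; split_ifs <;> omega

lemma whileA_eq (i : Nat) (v : List (Int × Int × Int)) :
    ∀ (n : Nat) (p : Int) (idx : Nat) (r : Int),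
      p.toNat + (v.length - idx) = n → idx ≤ v.length →
      whileA i p v v.length idx r =
        (r + (((v.drop idx).take (cnt p (v.length - idx))).map (wI i)).sum,
         idx + cnt p (v.length - idx)) := by
  intro n
  induction n using Nat.strong_induction_on with
  | _ n ih =>
      intro p idx r hn hidx
      by_cases hp : p = 0
      · subst hp
        rw [whileA]
        simp [cnt_zero_left]
      · rw [whileA, if_neg hp]
        by_cases hL : v.length ≤ idx
        · have : idx = v.length := by omega
          subst this
          rw [if_pos le_rfl]
          simp [cnt_zero]
        · rw [if_neg hL]
          have hlt : idx < v.length := by omega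
          rw [ih ((p - 1).toNat + (v.length - (idx + 1))) (by omega) (p - 1) (idx + 1) _
                rfl (by omega)]
          have hsub : v.length - idx = (v.length - (idx + 1)) + 1 := by omega
          rw [hsub, cnt_succ p _ hp]
          have hdrop : v.drop idx = v[idx] :: v.drop (idx + 1) :=
            List.drop_eq_getElem_cons hlt
          have hgetD : v.getD idx (0, 0, 0) = v[idx] := List.getD_eq_getElem _ _ hlt
          rw [hdrop, List.take_succ_cons, List.map_cons, List.sum_cons]
          simp only [Prod.mk.injEq]
          constructor
          · simp only [hgetD, wI]
            split_ifs <;> ring_nf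
          · omega

lemma pyGet_cons3 (p0 p1 p2 : Int) (rest : List Int) :
    ((PySem.List.pyGet? (p0 :: p1 :: p2 :: rest) 0).getD 0 = p0 ∧
     (PySem.List.pyGet? (p0 :: p1 :: p2 :: rest) 1).getD 0 = p1) ∧
    (PySem.List.pyGet? (p0 :: p1 :: p2 :: rest) 2).getD 0 = p2 := by
  refine ⟨⟨?_, ?_⟩, ?_⟩ <;>
    · simp [PySem.List.pyGet?, PySem.List.pyIdx?]
      split
      · simp
      · omega

lemma adv_stop (P : List Int) (t r : Int) (h : ¬ (r = 0 ∧ t < 2)) :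
    advanceB P t r = (t, r) := by
  rw [advanceB, if_neg h]

lemma adv_step (P : List Int) (t : Int) (h : t < 2) :
    advanceB P t 0 = advanceB P (t + 1) ((PySem.List.pyGet? P (t + 1)).getD 0) := by
  rw [advanceB, if_pos ⟨rfl, h⟩]

-- the pass at the last tier consumes min-style cnt groups and stops
lemma loopB_two (P : List Int) :
    ∀ (gs : List (Int × Int × Int)) (score r : Int),
      loopB P gs score 2 r = score + ((gs.take (cnt r gs.length)).map (wI 2)).sum := by
  intro gs
  induction gs with
  | nil => intro score r; simp [loopB]
  | cons g gs ih =>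
      intro score r
      rw [loopB]
      rw [adv_stop P 2 r (by omega)]
      by_cases hr : r = 0
      · subst hr
        simp [cnt_zero_left]
      · rw [if_neg hr, ih]
        rw [show (g :: gs).length = gs.length + 1 from rfl, cnt_succ r _ hr,
            List.take_succ_cons, List.map_cons, List.sum_cons]
        have hw : ((PySem.List.pyGet? weightsB 2).getD ((0 : Int), (0 : Int), (0 : Int)))
            = (25, 5, 1) := rfl
        rw [hw]
        simp only [wI]
        norm_num
        ring

-- a pass at tier 0 or 1 consumes cnt groups, then hands over to the next tier
lemma loopB_step (P : List Int) (t : Int) (ht : t = 0 ∨ t = 1) :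
    ∀ (gs : List (Int × Int × Int)) (score r : Int),
      loopB P gs score t r =
        loopB P (gs.drop (cnt r gs.length))
          (score + ((gs.take (cnt r gs.length)).map (wI t.toNat)).sum)
          (t + 1) ((PySem.List.pyGet? P (t + 1)).getD 0) := by
  intro gs
  induction gs with
  | nil => intro score r; simp [loopB]
  | cons g gs ih =>
      intro score r
      by_cases hr : r = 0
      · subst hr
        simp only [cnt_zero_left, List.drop_zero, List.take_zero, List.map_nil,
          List.sum_nil, add_zero]
        rw [loopB, adv_step P t (by rcases ht with rfl | rfl <;> omega)]
        conv_rhs => rw [loopB]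
      · rw [loopB, adv_stop P t r (by omega)]
        rw [if_neg hr, ih]
        rw [show (g :: gs).length = gs.length + 1 from rfl, cnt_succ r _ hr,
            List.take_succ_cons, List.drop_succ_cons, List.map_cons, List.sum_cons]
        have hw : ((PySem.List.pyGet? weightsB t).getD ((0 : Int), (0 : Int), (0 : Int))).1 * g.1
              + ((PySem.List.pyGet? weightsB t).getD ((0 : Int), (0 : Int), (0 : Int))).2.1 * g.2.1
              + ((PySem.List.pyGet? weightsB t).getD ((0 : Int), (0 : Int), (0 : Int))).2.2 * g.2.2
            = wI t.toNat g := by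
          rcases ht with rfl | rfl
          · rw [show (PySem.List.pyGet? weightsB 0).getD ((0 : Int), (0 : Int), (0 : Int))
                  = (1, 1, 1) from rfl]
            norm_num [wI]
          · rw [show (PySem.List.pyGet? weightsB 1).getD ((0 : Int), (0 : Int), (0 : Int))
                  = (5, 1, 1) from rfl]
            norm_num [wI]
            ring
        rw [hw]
        ring_nf

-- ===== VERDICT (by name: the statement is the Claim_ definition above) =====
theorem solution_spec : Claim_equal_solution := by
  intro picks minerals _ hpre
  unfold Spec_solution
  have hlen : 3 ≤ picks.length := hpre
  obtain ⟨p0, p1, p2, rest, rfl⟩ :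
      ∃ p0 p1 p2 rest, picks = p0 :: p1 :: p2 :: rest := by
    match picks, hlen with
    | p0 :: p1 :: p2 :: rest, _ => exact ⟨p0, p1, p2, rest, rfl⟩
  have hv : buildA minerals 0 (0, 0, 0) [] = chunksB minerals := by
    simpa using buildA_eq_chunksB minerals 0 (0, 0, 0) [] rfl (fun _ => rfl)
      (fun h => absurd rfl h)
  have hkey : keyA = keyB := rfl
  simp only [solution, solution_alt, hv, hkey, pyRange_chunks, (pyGet_cons3 p0 p1 p2 rest).1.1,
    (pyGet_cons3 p0 p1 p2 rest).1.2, (pyGet_cons3 p0 p1 p2 rest).2]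
  -- name the sorted truncated group list
  set v : List (Int × Int × Int) := PySem.List.sorted
      (PySem.List.slice (chunksB minerals) none (some (p0 :: p1 :: p2 :: rest).sum))
      keyB true with hvdef
  -- A's side: three while-loop passes
  rw [whileA_eq 0 v _ p0 0 0 rfl (Nat.zero_le _)]
  simp only [List.drop_zero, Nat.sub_zero, Nat.zero_add]
  rw [whileA_eq 1 v _ p1 _ _ rfl (by exact cnt_le _ _)]
  rw [whileA_eq 2 v _ p2 _ _ rfl (by
    have h1 := cnt_le p0 v.length
    have h2 := cnt_le p1 (v.length - cnt p0 v.length)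
    omega)]
  -- B's side: the single pass, tier by tier
  rw [loopB_step (p0 :: p1 :: p2 :: rest) 0 (Or.inl rfl)]
  norm_num [(pyGet_cons3 p0 p1 p2 rest).1.2]
  rw [loopB_step (p0 :: p1 :: p2 :: rest) 1 (Or.inr rfl)]
  norm_num [(pyGet_cons3 p0 p1 p2 rest).2]
  rw [loopB_two]
  -- align the segment descriptions on both sides
  simp [List.map_take, List.map_drop]
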